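-- pv_equiv track=rewrite | github.com/xutong0258/Abnormal_Shutdown | base/shutdown_util.py | get_list_text_line
-- ===== SOURCE A (Python) =====
-- def get_list_text_line(input_list, text):
--     text = text.lower()
--     text_line = None
--     for item in input_list:
--         item = item.lower()
--         # logger.info(f'item:{item}')
--         if text in item:
--             text_line = item.strip()
--     return text_line
-- ===== SOURCE B (Python) =====
-- def get_list_text_line(input_list, text):
--     t = text.lower()
--     for item in reversed(input_list):
--         low = item.lower()
--         if t in low:
--             return low.strip()
--     return None
-- ===== Notes on version B (the rewrite author's own statement) =====
-- stated objective: alternative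
-- what changed: Replaces A's forward scan that keeps overwriting a last-match accumulator with a reverse scan that returns the first match immediately (no accumulator).
import Mathlib
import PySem

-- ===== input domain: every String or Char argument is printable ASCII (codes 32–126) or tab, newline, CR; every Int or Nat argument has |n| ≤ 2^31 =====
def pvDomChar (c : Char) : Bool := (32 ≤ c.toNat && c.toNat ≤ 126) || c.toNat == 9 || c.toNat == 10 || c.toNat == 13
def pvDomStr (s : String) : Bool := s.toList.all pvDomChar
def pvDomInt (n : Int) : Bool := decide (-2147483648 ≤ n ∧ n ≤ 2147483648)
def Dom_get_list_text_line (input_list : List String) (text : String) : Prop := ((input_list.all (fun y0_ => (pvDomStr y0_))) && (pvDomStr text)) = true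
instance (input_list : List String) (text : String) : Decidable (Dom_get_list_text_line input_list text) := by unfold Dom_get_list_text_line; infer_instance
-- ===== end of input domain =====

-- B replaces A's forward scan with a last-match accumulator by a reverse scan with an
-- immediate return on the first match (alternative decomposition, same cost).


-- ===== PORT A =====
-- forward fold with accumulator text_line, overwritten on every match
def get_list_text_line (input_list : List String) (text : String) : Option String :=
  let t := PySem.Str.lower text
  input_list.foldl
    (fun text_line item =>
      let item' := PySem.Str.lower item
      if PySem.Str.isIn t item' then some (PySem.Str.strip item') else text_line)
    none

-- ===== PORT B =====
-- reverse scan, early return on first match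
def altGo (t : String) : List String → Option String
  | [] => none
  | item :: rest =>
      let low := PySem.Str.lower item
      if PySem.Str.isIn t low then some (PySem.Str.strip low) else altGo t rest

def get_list_text_line_alt (input_list : List String) (text : String) : Option String :=
  altGo (PySem.Str.lower text) input_list.reverse

-- ===== PRECONDITION & SPEC =====
def Spec_get_list_text_line (input_list : List String) (text : String) (out : Option String) : Prop := out = get_list_text_line_alt input_list text
instance (input_list : List String) (text : String) (out : Option String) : Decidable (Spec_get_list_text_line input_list text out) := by unfold Spec_get_list_text_line; infer_instance

-- ===== CLAIM (what is proved, stated in full; the proofs are below) =====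
def Claim_equal_get_list_text_line : Prop := ∀ (input_list : List String) (text : String), Dom_get_list_text_line input_list text → Spec_get_list_text_line input_list text (get_list_text_line input_list text)

-- ===== LEMMAS AND PROOFS =====

-- altGo scans left to right, so on a snoc the appended element is checked last
theorem altGo_append_singleton (t a : String) (xs : List String) :
    altGo t (xs ++ [a]) =
      (altGo t xs).or
        (if PySem.Str.isIn t (PySem.Str.lower a) then some (PySem.Str.strip (PySem.Str.lower a)) else none) := by
  induction xs with
  | nil => rfl
  | cons x xs ih =>
      simp only [List.cons_append, altGo]
      rw [ih]
      split_ifs <;> rfl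

-- the forward fold from any accumulator equals: first match in reverse order, else the accumulator
theorem foldl_eq_altGo (t : String) (xs : List String) (acc : Option String) :
    xs.foldl
      (fun text_line item =>
        let item' := PySem.Str.lower item
        if PySem.Str.isIn t item' then some (PySem.Str.strip item') else text_line)
      acc
    = (altGo t xs.reverse).or acc := by
  induction xs generalizing acc with
  | nil => rfl
  | cons x xs ih =>
      rw [List.foldl_cons, ih, List.reverse_cons, altGo_append_singleton]
      cases altGo t xs.reverse with
      | some v => rfl
      | none =>
          show (if PySem.Str.isIn t (PySem.Str.lower x) then some (PySem.Str.strip (PySem.Str.lower x)) else acc) = _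
          split_ifs <;> rfl

-- ===== VERDICT (by name: the statement is the Claim_ definition above) =====
theorem get_list_text_line_spec : Claim_equal_get_list_text_line := by
  intro input_list text _
  unfold Spec_get_list_text_line get_list_text_line get_list_text_line_alt
  rw [foldl_eq_altGo]
  cases altGo (PySem.Str.lower text) input_list.reverse <;> rfl
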